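-- pv_equiv track=rewrite | github.com/anakfernandes/Lab_Programacao_1 | Programação 1/Programação 1/u6/vogais_primeiro.py | vogais_primeiro
-- ===== SOURCE A (Python) =====
-- def vogais_primeiro(frase):  # recebe uma string como parâmetro
--     vogais = ''
--     outros = ''
--
--     for letra in frase:
--         if letra in 'aeiouAEIOU':
--             vogais += letra
--         else:
--             outros += letra
--
--     nova_string = vogais + outros
--
--     return nova_string
-- ===== SOURCE B (Python) =====
-- def vogais_primeiro(frase):
--     return ''.join(sorted(frase, key=lambda c: c not in 'aeiouAEIOU'))
-- ===== Notes on version B (the rewrite author's own statement) =====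
-- stated objective: idiomatic
-- what changed: Replaces the two string accumulators and explicit branch with a single stable sort keyed on non-vowelness, delegating the vowels-first reordering to the stability of sorted().
import Mathlib
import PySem

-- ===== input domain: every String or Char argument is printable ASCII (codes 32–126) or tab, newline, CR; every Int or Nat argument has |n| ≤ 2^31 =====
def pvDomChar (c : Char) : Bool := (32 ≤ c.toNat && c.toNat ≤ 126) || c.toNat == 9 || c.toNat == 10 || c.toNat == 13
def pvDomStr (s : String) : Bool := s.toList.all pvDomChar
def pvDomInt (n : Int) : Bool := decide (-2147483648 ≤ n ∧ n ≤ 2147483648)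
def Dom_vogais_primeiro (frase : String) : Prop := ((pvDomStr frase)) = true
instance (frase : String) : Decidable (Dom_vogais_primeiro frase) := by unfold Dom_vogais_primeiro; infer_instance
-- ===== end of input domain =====

-- B replaces A's two accumulator strings with one stable sort keyed on "is not a vowel" (idiomatic, not faster).
-- ===== PORT A =====
def vogais_primeiro (frase : String) : String :=
  let p := frase.toList.foldl
    (fun (acc : List Char × List Char) letra =>
      if "aeiouAEIOU".toList.contains letra then (acc.1 ++ [letra], acc.2)
      else (acc.1, acc.2 ++ [letra]))
    ([], [])
  String.ofList (p.1 ++ p.2)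

-- ===== PORT B =====
def vogais_primeiro_alt (frase : String) : String :=
  String.ofList (PySem.List.sorted frase.toList (fun c => !("aeiouAEIOU".toList.contains c)) false)

-- ===== PRECONDITION & SPEC =====
def Spec_vogais_primeiro (frase : String) (out : String) : Prop := out = vogais_primeiro_alt frase
instance (frase : String) (out : String) : Decidable (Spec_vogais_primeiro frase out) := by unfold Spec_vogais_primeiro; infer_instance

-- ===== CLAIM (what is proved, stated in full; the proofs are below) =====
def Claim_equal_vogais_primeiro : Prop := ∀ (frase : String), Dom_vogais_primeiro frase → Spec_vogais_primeiro frase (vogais_primeiro frase)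

-- ===== LEMMAS AND PROOFS =====

-- inserting an element whose key is false goes past the false-key block and before the true-key block
theorem insert_keyfalse {α : Type} (key : α → Bool) (x : α) (hx : key x = false) :
    ∀ (V O : List α), (∀ v ∈ V, key v = false) → (∀ o ∈ O, key o = true) →
      PySem.List.insertBy (fun a b => decide (key a < key b)) x (V ++ O) = V ++ x :: O := by
  intro V
  induction V with
  | nil =>
    intro O _ hO
    cases O with
    | nil => rfl
    | cons o t =>
      simp [PySem.List.insertBy, hx, hO o (by simp)]
  | cons v V ih =>
    intro O hV hO
    have hv : key v = false := hV v (by simp)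
    simp [PySem.List.insertBy, hx, hv]
    exact ih O (fun w hw => hV w (by simp [hw])) hO

-- inserting an element whose key is true goes to the very end
theorem insert_keytrue {α : Type} (key : α → Bool) (x : α) (hx : key x = true) :
    ∀ (l : List α), PySem.List.insertBy (fun a b => decide (key a < key b)) x l = l ++ [x] := by
  intro l
  induction l with
  | nil => rfl
  | cons y ys ih => simp [PySem.List.insertBy, hx, ih]

-- the insertion-sort fold with a boolean key is the stable two-way partition
theorem fold_insert_partition {α : Type} (key : α → Bool) :
    ∀ (xs V O : List α), (∀ v ∈ V, key v = false) → (∀ o ∈ O, key o = true) →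
      xs.foldl (fun acc x => PySem.List.insertBy (fun a b => decide (key a < key b)) x acc) (V ++ O)
        = (V ++ xs.filter (fun x => key x = false)) ++ (O ++ xs.filter (fun x => key x = true)) := by
  intro xs
  induction xs with
  | nil => intro V O _ _; simp
  | cons x xs ih =>
    intro V O hV hO
    by_cases hx : key x = true
    · rw [List.foldl_cons, insert_keytrue key x hx (V ++ O), List.append_assoc,
        ih V (O ++ [x]) hV (by intro o ho; rcases List.mem_append.mp ho with h | h
                               · exact hO o h
                               · simp at h; simpa [h])]
      simp [hx]
    · have hx' : key x = false := by simpa using hx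
      rw [List.foldl_cons, insert_keyfalse key x hx' V O hV hO]
      have : V ++ x :: O = (V ++ [x]) ++ O := by simp
      rw [this, ih (V ++ [x]) O
        (by intro v hv; rcases List.mem_append.mp hv with h | h
            · exact hV v h
            · simp at h; simpa [h]) hO]
      simp [hx']

-- ===== VERDICT (by name: the statement is the Claim_ definition above) =====
theorem vogais_primeiro_spec : Claim_equal_vogais_primeiro := by
  intro frase _
  unfold Spec_vogais_primeiro vogais_primeiro vogais_primeiro_alt PySem.List.sorted
  dsimp only
  have hsplit :
      (fun (acc : List Char × List Char) letra =>
          if "aeiouAEIOU".toList.contains letra then (acc.1 ++ [letra], acc.2)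
          else (acc.1, acc.2 ++ [letra]))
        = (fun (acc : List Char × List Char) letra =>
            ((fun a x => if "aeiouAEIOU".toList.contains x then a ++ [x] else a) acc.1 letra,
             (fun b x => if !("aeiouAEIOU".toList.contains x) then b ++ [x] else b) acc.2 letra)) := by
    funext acc letra
    dsimp only
    cases h : "aeiouAEIOU".toList.contains letra <;> simp
  rw [hsplit]
  simp only [Bool.false_eq_true, if_false]
  rw [PySem.List.foldl_prod_mk
    (fun a x => if "aeiouAEIOU".toList.contains x then a ++ [x] else a)
    (fun b x => if !("aeiouAEIOU".toList.contains x) then b ++ [x] else b)]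
  rw [PySem.List.foldl_append_if (fun x => "aeiouAEIOU".toList.contains x) (fun x => x),
    PySem.List.foldl_append_if (fun x => !("aeiouAEIOU".toList.contains x)) (fun x => x)]
  have hmain := fold_insert_partition (fun c => !("aeiouAEIOU".toList.contains c))
    frase.toList [] [] (by simp) (by simp)
  simp only [List.nil_append, List.append_nil] at hmain ⊢
  rw [hmain]
  congr 1
  simp only [List.map_id']
  congr 1
  · apply List.filter_congr; intro x _; simp
  · apply List.filter_congr; intro x _; simp
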